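-- pv_equiv track=rewrite | github.com/smartandhandsome/Algorithm | 프로그래머스/lv3/84021. 퍼즐 조각 채우기/퍼즐 조각 채우기.py | solution
-- ===== SOURCE A (Python) =====
-- import copy
-- from collections import deque
--
-- def find_out(a, b, matrix, isTable):
--     direction = ((0, 1), (1, 0), (-1, 0), (0, -1))
--     queue = deque([(a, b)])
--     block = [(0, 0)]
--     matrix[a][b] = (0 if isTable else 1)
--     while queue:
--         y, x = queue.popleft()
--         for i in range(4):
--             moveY, moveX = direction[i]
--             movedY = y + moveY
--             movedX = x + moveX
--             if 0 <= movedY < len(matrix) and \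
--                     0 <= movedX < len(matrix[0]) and \
--                     matrix[movedY][movedX] == (1 if isTable else 0):
--                 matrix[movedY][movedX] = (0 if isTable else 1)
--                 queue.append((movedY, movedX))
--                 block.append((movedY-a, movedX-b))
--     return block
--
-- def reset_point(stuff):
--     stuff.sort()
--     a, b = stuff[0]
--     for i in range(len(stuff)):
--         ta, tb = stuff[i]
--         stuff[i] = (stuff[i][0] - a, stuff[i][1] - b)
--     return stuff
--
-- def spin(block):
--     spined = []
--     for b in block:
--         y, x = b
--         spined.append((x, -y))
--     return reset_point(spined)
--
-- def same_or_not(blank, blocks):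
--     for block in blocks:
--         temp = copy.deepcopy(block)
--         for i in range(4):
--             if temp == blank:
--                 blocks.remove(block)
--                 return len(blank)
--             temp = spin(temp)
--     return 0
--
-- def solution(game_board, table):
--     answer = 0
--     blocks = []
--     for i in range(len(table)):
--         for j in range(len(table[0])):
--             if table[i][j] == 1:
--                 blocks.append(reset_point(find_out(i, j, table, True)))
--     blanks = []
--     for i in range(len(game_board)):
--         for j in range(len(game_board[0])):
--             if game_board[i][j] == 0:
--                 answer += same_or_not(reset_point(find_out(i,
--                                       j, game_board, False)), blocks)
--     return answer
-- ===== SOURCE B (Python) =====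
-- # B: same flood-fill extraction, but matching by canonical-rotation Counter lookup
-- # instead of A's quadratic scan over all remaining blocks with 4 rotations each.
-- # (Like A, this mutates game_board and table in place via the flood fill.)
-- from collections import deque, Counter
--
--
-- def find_out(a, b, matrix, isTable):
--     direction = ((0, 1), (1, 0), (-1, 0), (0, -1))
--     queue = deque([(a, b)])
--     block = [(0, 0)]
--     matrix[a][b] = (0 if isTable else 1)
--     while queue:
--         y, x = queue.popleft()
--         for i in range(4):
--             moveY, moveX = direction[i]
--             movedY = y + moveY
--             movedX = x + moveX
--             if 0 <= movedY < len(matrix) and \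
--                     0 <= movedX < len(matrix[0]) and \
--                     matrix[movedY][movedX] == (1 if isTable else 0):
--                 matrix[movedY][movedX] = (0 if isTable else 1)
--                 queue.append((movedY, movedX))
--                 block.append((movedY-a, movedX-b))
--     return block
--
--
-- def reset_point(stuff):
--     stuff.sort()
--     a, b = stuff[0]
--     for i in range(len(stuff)):
--         stuff[i] = (stuff[i][0] - a, stuff[i][1] - b)
--     return stuff
--
--
-- def spin(block):
--     spined = []
--     for b in block:
--         y, x = b
--         spined.append((x, -y))
--     return reset_point(spined)
--
--
-- def canonical(shape):
--     best = shape
--     cur = shape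
--     for _ in range(3):
--         cur = spin(cur)
--         if cur < best:
--             best = cur
--     return best
--
--
-- def solution(game_board, table):
--     blocks = []
--     for i in range(len(table)):
--         for j in range(len(table[0])):
--             if table[i][j] == 1:
--                 blocks.append(reset_point(find_out(i, j, table, True)))
--     counts = Counter()
--     for b in blocks:
--         counts[tuple(canonical(b))] += 1
--     answer = 0
--     for i in range(len(game_board)):
--         for j in range(len(game_board[0])):
--             if game_board[i][j] == 0:
--                 blank = reset_point(find_out(i, j, game_board, False))
--                 key = tuple(canonical(blank))
--                 if counts[key] > 0:
--                     counts[key] -= 1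
--                     answer += len(blank)
--     return answer
-- ===== Notes on version B (the rewrite author's own statement) =====
-- stated objective: alternative
-- what changed: A matches each blank by scanning the whole remaining block list and comparing it against all 4 rotations of every block (removing the matched one); B normalizes every block once to its canonical (lexicographically least) rotation, stores the multiset of canonical forms in a Counter, and matches each blank by one canonical-form computation and a single counter lookup/decrement.
import Mathlib
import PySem

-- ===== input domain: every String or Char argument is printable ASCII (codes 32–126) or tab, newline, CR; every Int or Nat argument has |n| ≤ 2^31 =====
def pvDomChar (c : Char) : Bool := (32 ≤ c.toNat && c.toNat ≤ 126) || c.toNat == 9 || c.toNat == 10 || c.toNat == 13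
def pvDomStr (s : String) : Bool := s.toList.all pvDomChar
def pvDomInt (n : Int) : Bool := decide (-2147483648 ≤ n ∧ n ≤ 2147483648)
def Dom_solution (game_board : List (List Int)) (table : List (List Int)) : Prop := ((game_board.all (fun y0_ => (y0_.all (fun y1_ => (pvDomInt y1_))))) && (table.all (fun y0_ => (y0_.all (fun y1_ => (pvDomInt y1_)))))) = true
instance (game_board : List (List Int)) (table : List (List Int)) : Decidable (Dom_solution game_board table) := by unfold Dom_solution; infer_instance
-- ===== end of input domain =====

-- B changes the matching phase only: blocks are put in a counter keyed by their canonical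
-- (lexicographically least) rotation and each blank is matched by one lookup, instead of A's
-- scan over all remaining blocks with four rotations each.  Like A, both Pythons mutate
-- game_board and table in place (flood-fill marking); the equivalence is about the return value.

-- ===== PORT A =====
-- matrix[y][x] read / write (bounds are always checked by the Python before they matter)
def mget (m : List (List Int)) (y x : Int) : Int :=
  (PySem.List.pyGet? ((PySem.List.pyGet? m y).getD []) x).getD 0

def mset (m : List (List Int)) (y x : Int) (v : Int) : List (List Int) :=
  m.modify y.toNat (fun row => row.set x.toNat v)

def dirs : List (Int × Int) := [(0, 1), (1, 0), (-1, 0), (0, -1)]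

-- one BFS pop: scan the 4 directions, flipping/enqueuing fresh cells (state: queue, matrix, block)
def bfsDirs (isTable : Bool) (a b y x : Int)
    (st : List (Int × Int) × List (List Int) × List (Int × Int)) :
    List (Int × Int) × List (List Int) × List (Int × Int) :=
  dirs.foldl (fun st d =>
    let q := st.1; let mm := st.2.1; let blk := st.2.2
    let my := y + d.1
    let mx := x + d.2
    if 0 ≤ my ∧ my < (mm.length : Int) ∧ 0 ≤ mx ∧ mx < ((mm.headD []).length : Int) ∧
        mget mm my mx = (if isTable then 1 else 0) then
      (q ++ [(my, mx)], mset mm my mx (if isTable then 0 else 1), blk ++ [(my - a, mx - b)])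
    else st) st

-- the while-queue loop; fuel (cells+1) dominates the number of pops, so the 0-case is unreachable
def bfs (isTable : Bool) (a b : Int) :
    Nat → List (Int × Int) → List (List Int) → List (Int × Int) →
    List (Int × Int) × List (List Int)
  | 0, _, m, block => (block, m)
  | _ + 1, [], m, block => (block, m)
  | fuel + 1, (y, x) :: qs, m, block =>
    let st := bfsDirs isTable a b y x (qs, m, block)
    bfs isTable a b fuel st.1 st.2.1 st.2.2

-- find_out: returns (block, mutated matrix)
def findOut (a b : Int) (m : List (List Int)) (isTable : Bool) :
    List (Int × Int) × List (List Int) :=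
  let m0 := mset m a b (if isTable then 0 else 1)
  bfs isTable a b (m.length * (m.headD []).length + 1) [(a, b)] m0 [(0, 0)]

-- reset_point: sort (Python tuple order) and translate by the first element
def resetPoint (stuff : List (Int × Int)) : List (Int × Int) :=
  match PySem.List.sorted2 stuff (fun p => p.1) (fun p => p.2) with
  | [] => []
  | (a, b) :: t => ((a, b) :: t).map (fun p => (p.1 - a, p.2 - b))

def spin (block : List (Int × Int)) : List (Int × Int) :=
  resetPoint (block.map (fun p => (p.2, -p.1)))

-- the `for i in range(4): if temp == blank … temp = spin(temp)` loop of same_or_not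
def tryRot : Nat → List (Int × Int) → List (Int × Int) → Bool
  | 0, _, _ => false
  | n + 1, temp, blank => if temp = blank then true else tryRot n (spin temp) blank

-- same_or_not: scan blocks, on first rotation-match remove it from the full list
def snGo (blank : List (Int × Int)) (full : List (List (Int × Int))) :
    List (List (Int × Int)) → Int × List (List (Int × Int))
  | [] => (0, full)
  | b :: rest =>
    if tryRot 4 b blank then
      ((blank.length : Int), (PySem.List.remove? full b).getD full)
    else snGo blank full rest

def sameOrNot (blank : List (Int × Int)) (blocks : List (List (Int × Int))) :
    Int × List (List (Int × Int)) :=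
  snGo blank blocks blocks

-- block extraction loops (shared verbatim by both Pythons)
def collectJ (i : Int) : List Int → List (List Int) × List (List (Int × Int)) →
    List (List Int) × List (List (Int × Int))
  | [], st => st
  | j :: js, (m, blocks) =>
    if mget m i j = 1 then
      let r := findOut i j m true
      collectJ i js (r.2, blocks ++ [resetPoint r.1])
    else collectJ i js (m, blocks)

def collectI : List Int → List (List Int) × List (List (Int × Int)) →
    List (List Int) × List (List (Int × Int))
  | [], st => st
  | i :: is, (m, blocks) =>
    collectI is (collectJ i (PySem.List.pyRange 0 (((m.headD []).length : Nat) : Int) 1) (m, blocks))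

-- A's answer loop: state (game_board, blocks, answer)
def ansJ (i : Int) : List Int → List (List Int) × List (List (Int × Int)) × Int →
    List (List Int) × List (List (Int × Int)) × Int
  | [], st => st
  | j :: js, (m, blocks, ans) =>
    if mget m i j = 0 then
      let r := findOut i j m false
      let s := sameOrNot (resetPoint r.1) blocks
      ansJ i js (r.2, s.2, ans + s.1)
    else ansJ i js (m, blocks, ans)

def ansI : List Int → List (List Int) × List (List (Int × Int)) × Int →
    List (List Int) × List (List (Int × Int)) × Int
  | [], st => st
  | i :: is, (m, blocks, ans) =>
    ansI is (ansJ i (PySem.List.pyRange 0 (((m.headD []).length : Nat) : Int) 1) (m, blocks, ans))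

def solution (game_board : List (List Int)) (table : List (List Int)) : Int :=
  let c := collectI (PySem.List.pyRange 0 ((table.length : Nat) : Int) 1) (table, [])
  let r := ansI (PySem.List.pyRange 0 ((game_board.length : Nat) : Int) 1) (game_board, c.2, 0)
  r.2.2

-- ===== PORT B =====
-- Python `<` on tuples / lists of tuples
def pairLtB (p q : Int × Int) : Bool := p.1 < q.1 || (p.1 == q.1 && p.2 < q.2)

def shapeLt : List (Int × Int) → List (Int × Int) → Bool
  | [], [] => false
  | [], _ :: _ => true
  | _ :: _, [] => false
  | p :: ps, q :: qs => if p = q then shapeLt ps qs else pairLtB p q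

-- canonical: least of the four rotations (Source B's `for _ in range(3)` loop)
def canonGo : Nat → List (Int × Int) → List (Int × Int) → List (Int × Int)
  | 0, _, best => best
  | n + 1, cur, best =>
    let c := spin cur
    canonGo n c (if shapeLt c best then c else best)

def canonical (s : List (Int × Int)) : List (Int × Int) := canonGo 3 s s

-- counts[tuple(canonical(b))] += 1 loop
def counterOf (blocks : List (List (Int × Int))) : PySem.Dict (List (Int × Int)) Int :=
  blocks.foldl (fun d b => d.modify (canonical b) 0 (· + 1)) PySem.Dict.empty

-- B's answer loop: state (game_board, counter, answer)
def ansJB (i : Int) : List Int → List (List Int) × PySem.Dict (List (Int × Int)) Int × Int →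
    List (List Int) × PySem.Dict (List (Int × Int)) Int × Int
  | [], st => st
  | j :: js, (m, counts, ans) =>
    if mget m i j = 0 then
      let r := findOut i j m false
      let blank := resetPoint r.1
      let key := canonical blank
      if 0 < counts.getD key 0 then
        ansJB i js (r.2, counts.modify key 0 (· - 1), ans + (blank.length : Int))
      else ansJB i js (r.2, counts, ans)
    else ansJB i js (m, counts, ans)

def ansIB : List Int → List (List Int) × PySem.Dict (List (Int × Int)) Int × Int →
    List (List Int) × PySem.Dict (List (Int × Int)) Int × Int
  | [], st => st
  | i :: is, (m, counts, ans) =>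
    ansIB is (ansJB i (PySem.List.pyRange 0 (((m.headD []).length : Nat) : Int) 1) (m, counts, ans))

def solution_alt (game_board : List (List Int)) (table : List (List Int)) : Int :=
  let c := collectI (PySem.List.pyRange 0 ((table.length : Nat) : Int) 1) (table, [])
  let counts := counterOf c.2
  let r := ansIB (PySem.List.pyRange 0 ((game_board.length : Nat) : Int) 1) (game_board, counts, 0)
  r.2.2

-- ===== PRECONDITION & SPEC =====
-- Pre_ excludes exactly the ragged matrices on which A raises IndexError: both loops read
-- every column index below the first row's length in every row, so any row shorter than the
-- first row of its matrix is accessed out of range.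
def Pre_solution (game_board : List (List Int)) (table : List (List Int)) : Prop :=
  (∀ row ∈ game_board, (game_board.headD []).length ≤ row.length) ∧
  (∀ row ∈ table, (table.headD []).length ≤ row.length)
instance (game_board : List (List Int)) (table : List (List Int)) : Decidable (Pre_solution game_board table) := by unfold Pre_solution; infer_instance

def pvWitness_solution : List (List Int) × List (List Int) :=
  ([[1, 0], [0, 1]], [[1, 0], [0, 1]])

def Spec_solution (game_board : List (List Int)) (table : List (List Int)) (out : Int) : Prop := out = solution_alt game_board table
instance (game_board : List (List Int)) (table : List (List Int)) (out : Int) : Decidable (Spec_solution game_board table out) := by unfold Spec_solution; infer_instance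

-- ===== CLAIM (what is proved, stated in full; the proofs are below) =====
def Claim_equal_solution : Prop := ∀ (game_board : List (List Int)) (table : List (List Int)), Dom_solution game_board table → Pre_solution game_board table → Spec_solution game_board table (solution game_board table)

-- ===== LEMMAS AND PROOFS =====

-- ▸ normalised shapes, orbits, and the counter invariant (proof-side notions)
def IsNorm (b : List (Int × Int)) : Prop := resetPoint b = b

def sOrbitMem (y p : List (Int × Int)) : Prop :=
  y = p ∨ y = spin p ∨ y = spin (spin p) ∨ y = spin (spin (spin p))

def CntInv (blocks : List (List (Int × Int))) (counts : PySem.Dict (List (Int × Int)) Int) : Prop :=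
  ∀ k, counts.getD k 0 = ((blocks.map canonical).count k : Int)

theorem solution_witness_pre : Pre_solution pvWitness_solution.1 pvWitness_solution.2 := by decide

-- ▸ proof-only helpers
def rpOf : List (Int × Int) → List (Int × Int)
  | [] => []
  | hd :: t => (hd :: t).map (fun p => (p.1 - hd.1, p.2 - hd.2))

def min2 (x y : List (Int × Int)) : List (Int × Int) := if shapeLt y x then y else x

theorem toLexInj : Function.Injective (fun p : Int × Int => toLex p) :=
  fun _ _ h => toLex.injective h

theorem rpOf_cons (hd : Int × Int) (tl : List (Int × Int)) :
    rpOf (hd :: tl) = (hd :: tl).map (fun p => (p.1 - hd.1, p.2 - hd.2)) := rfl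

-- ▸ the Python tuple order is the lexicographic order on ℤ ×ₗ ℤ
theorem sorted2_eq_sortedLex (xs : List (Int × Int)) :
    PySem.List.sorted2 xs (fun p => p.1) (fun p => p.2) =
    PySem.List.sorted xs (fun p => toLex p) := by
  have hf : (fun (a b : Int × Int) =>
        decide (a.1 < b.1) || (!decide (b.1 < a.1) && decide (a.2 < b.2))) =
      (fun (a b : Int × Int) => decide (toLex a < toLex b)) := by
    funext a b
    by_cases h1 : a.1 < b.1
    · simp [Prod.Lex.lt_iff, h1]
    · by_cases h2 : a.1 = b.1
      · simp [Prod.Lex.lt_iff, h2]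
      · have h3 : b.1 < a.1 := by omega
        simp [Prod.Lex.lt_iff, h1, h2, h3]
  rw [PySem.List.sorted_eq_foldl_insertBy]
  simp only [PySem.List.sorted2, if_neg (by decide : ¬ (false = true))]
  rw [hf]

theorem resetPoint_eq_rpOf (l : List (Int × Int)) :
    resetPoint l = rpOf (PySem.List.sorted l (fun p => toLex p)) := by
  unfold resetPoint
  rw [sorted2_eq_sortedLex]
  cases h : PySem.List.sorted l (fun p => toLex p) with
  | nil => rfl
  | cons hd tl => obtain ⟨a, b⟩ := hd; rfl

-- ▸ order facts about shapeLt
theorem pairLtB_iff (p q : Int × Int) :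
    pairLtB p q = true ↔ (p.1 < q.1 ∨ (p.1 = q.1 ∧ p.2 < q.2)) := by
  simp [pairLtB]

theorem shapeLt_irrefl (a : List (Int × Int)) : shapeLt a a = false := by
  induction a with
  | nil => rfl
  | cons p ps ih => simp [shapeLt, ih]

theorem shapeLt_trans {a b c : List (Int × Int)} :
    shapeLt a b = true → shapeLt b c = true → shapeLt a c = true := by
  induction a generalizing b c with
  | nil =>
    cases b with
    | nil => simp [shapeLt]
    | cons q qs => cases c <;> simp [shapeLt]
  | cons p ps ih =>
    cases b with
    | nil => simp [shapeLt]
    | cons q qs =>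
      cases c with
      | nil => simp [shapeLt]
      | cons r rs =>
        simp only [shapeLt]
        by_cases h1 : p = q <;> by_cases h2 : q = r
        · subst h1; subst h2; simp only [if_pos]; exact ih
        · subst h1
          intro hab hbc
          rw [if_neg h2] at hbc
          rw [if_neg h2]
          exact hbc
        · subst h2
          intro hab _
          rw [if_neg h1] at hab
          rw [if_neg h1]
          exact hab
        · simp only [if_neg h1, if_neg h2]
          intro hpq hqr
          by_cases h3 : p = r
          · exfalso
            rw [pairLtB_iff] at hpq hqr
            obtain ⟨p1, p2⟩ := p; obtain ⟨q1, q2⟩ := q; obtain ⟨r1, r2⟩ := r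
            simp_all [Prod.mk.injEq]; omega
          · rw [if_neg h3, pairLtB_iff]
            rw [pairLtB_iff] at hpq hqr
            obtain ⟨p1, p2⟩ := p; obtain ⟨q1, q2⟩ := q; obtain ⟨r1, r2⟩ := r
            simp_all; omega

theorem shapeLt_conn {a b : List (Int × Int)} :
    shapeLt a b = false → shapeLt b a = false → a = b := by
  induction a generalizing b with
  | nil => cases b <;> simp [shapeLt]
  | cons p ps ih =>
    cases b with
    | nil => simp [shapeLt]
    | cons q qs =>
      simp only [shapeLt]
      by_cases h1 : p = q
      · subst h1; simp only [if_pos]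
        intro hab hba; rw [ih hab hba]
      · have h1' : q ≠ p := fun h => h1 h.symm
        simp only [if_neg h1, if_neg h1']
        intro hpq hqp
        exfalso
        obtain ⟨p1, p2⟩ := p; obtain ⟨q1, q2⟩ := q
        simp [pairLtB, Prod.mk.injEq] at hpq hqp h1
        omega

theorem shapeLt_asymm {a b : List (Int × Int)} (h : shapeLt a b = true) :
    shapeLt b a = false := by
  by_contra hc
  rw [Bool.not_eq_false] at hc
  have habs := shapeLt_trans h hc
  rw [shapeLt_irrefl] at habs
  exact Bool.false_ne_true habs

theorem shapeLt_negtrans {a b c : List (Int × Int)} (hab : shapeLt a b = false)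
    (hbc : shapeLt b c = false) : shapeLt a c = false := by
  by_contra hc
  rw [Bool.not_eq_false] at hc
  cases hba : shapeLt b a with
  | false =>
    have heq := shapeLt_conn hab hba
    subst heq
    rw [hc] at hbc
    simp at hbc
  | true =>
    have htr := shapeLt_trans hba hc
    rw [htr] at hbc
    simp at hbc

-- ▸ resetPoint facts
theorem resetPoint_perm_congr {l l' : List (Int × Int)} (h : l.Perm l') :
    resetPoint l = resetPoint l' := by
  rw [resetPoint_eq_rpOf, resetPoint_eq_rpOf,
    PySem.List.sorted_eq_sorted_of_perm l l' (fun p => toLex p) toLexInj h]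

theorem lex_le_sub {a b : Int} {x y : Int × Int} (h : toLex x ≤ toLex y) :
    toLex (x.1 - a, x.2 - b) ≤ toLex (y.1 - a, y.2 - b) := by
  rw [Prod.Lex.le_iff] at h ⊢
  simp only [ofLex_toLex] at h ⊢
  rcases h with h | ⟨h1, h2⟩
  · left; omega
  · right; exact ⟨by omega, by omega⟩

theorem sortedLex_map_sub (l : List (Int × Int)) (a b : Int) :
    PySem.List.sorted (l.map (fun p => (p.1 - a, p.2 - b))) (fun p => toLex p) =
      (PySem.List.sorted l (fun p => toLex p)).map (fun p => (p.1 - a, p.2 - b)) := by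
  apply PySem.List.eq_of_perm_of_pairwise_le_of_injective (fun p => toLex p) toLexInj
  · exact (PySem.List.sorted_perm _ _ _).trans
      (((PySem.List.sorted_perm l _ false).map _).symm)
  · exact PySem.List.sorted_pairwise _ _
  · exact List.Pairwise.map _ (fun u v huv => lex_le_sub huv)
      (PySem.List.sorted_pairwise l (fun p => toLex p))

theorem resetPoint_map_sub (l : List (Int × Int)) (a b : Int) :
    resetPoint (l.map (fun p => (p.1 - a, p.2 - b))) = resetPoint l := by
  rw [resetPoint_eq_rpOf, resetPoint_eq_rpOf, sortedLex_map_sub]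
  cases h : PySem.List.sorted l (fun p => toLex p) with
  | nil => rfl
  | cons hd tl =>
    simp only [List.map_cons, rpOf_cons, List.map_map, List.cons.injEq, Prod.mk.injEq]
    refine ⟨⟨by ring, by ring⟩, ?_⟩
    apply List.map_congr_left
    intro p _
    simp only [Function.comp_apply, Prod.mk.injEq]
    constructor <;> ring

theorem isNorm_resetPoint (l : List (Int × Int)) : IsNorm (resetPoint l) := by
  unfold IsNorm
  cases h : PySem.List.sorted l (fun p => toLex p) with
  | nil =>
    have h0 : resetPoint l = [] := by rw [resetPoint_eq_rpOf, h]; rfl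
    rw [h0]
    rfl
  | cons hd tl =>
    have h1 : resetPoint l = (hd :: tl).map (fun p => (p.1 - hd.1, p.2 - hd.2)) := by
      rw [resetPoint_eq_rpOf, h, rpOf_cons]
    have h2 : PySem.List.sorted ((hd :: tl).map (fun p => (p.1 - hd.1, p.2 - hd.2)))
        (fun p => toLex p) = (hd :: tl).map (fun p => (p.1 - hd.1, p.2 - hd.2)) := by
      rw [← h, sortedLex_map_sub, h]
      rw [show ((hd :: tl) : List (Int × Int)) = PySem.List.sorted l (fun p => toLex p) from h.symm]
      rw [PySem.List.sorted_sorted]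
    rw [h1, resetPoint_eq_rpOf, h2]
    simp only [List.map_cons, rpOf_cons, List.map_map, List.cons.injEq, Prod.mk.injEq]
    refine ⟨⟨by ring, by ring⟩, ?_⟩
    apply List.map_congr_left
    intro p _
    simp only [Function.comp_apply, Prod.mk.injEq]
    constructor <;> ring

theorem isNorm_spin (x : List (Int × Int)) : IsNorm (spin x) := isNorm_resetPoint _

theorem spin_resetPoint (l : List (Int × Int)) :
    spin (resetPoint l) = resetPoint (l.map (fun p => (p.2, -p.1))) := by
  unfold spin
  cases h : PySem.List.sorted l (fun p => toLex p) with
  | nil =>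
    have hl : l = [] := (PySem.List.sorted_eq_nil_iff l _ false).mp h
    subst hl
    rfl
  | cons hd tl =>
    obtain ⟨c, d⟩ := hd
    have h1 : resetPoint l = ((c, d) :: tl).map (fun p => (p.1 - c, p.2 - d)) := by
      rw [resetPoint_eq_rpOf, h, rpOf_cons]
    have hcmp : ((fun p : Int × Int => (p.2, -p.1)) ∘ (fun p : Int × Int => (p.1 - c, p.2 - d))) =
        ((fun p : Int × Int => (p.1 - d, p.2 - (-c))) ∘ (fun p : Int × Int => (p.2, -p.1))) := by
      funext p
      obtain ⟨u, v⟩ := p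
      show ((v : Int) - d, -(u - c)) = (v - d, -u - -c)
      refine Prod.ext rfl ?_
      ring
    rw [h1, List.map_map, hcmp, ← List.map_map, resetPoint_map_sub]
    have hperm : (((c, d) :: tl).map (fun p : Int × Int => (p.2, -p.1))).Perm
        (l.map (fun p : Int × Int => (p.2, -p.1))) := by
      rw [← h]
      exact (PySem.List.sorted_perm l (fun p => toLex p) false).map _
    exact resetPoint_perm_congr hperm

theorem spin4 {p : List (Int × Int)} (hp : IsNorm p) : spin (spin (spin (spin p))) = p := by
  have e1 : spin p = resetPoint (p.map (fun q => (q.2, -q.1))) := by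
    conv_lhs => rw [show p = resetPoint p from hp.symm]
    exact spin_resetPoint p
  have e2 : spin (spin p) =
      resetPoint ((p.map (fun q => (q.2, -q.1))).map (fun q => (q.2, -q.1))) := by
    rw [e1, spin_resetPoint]
  have e3 : spin (spin (spin p)) =
      resetPoint (((p.map (fun q => (q.2, -q.1))).map (fun q => (q.2, -q.1))).map
        (fun q => (q.2, -q.1))) := by
    rw [e2, spin_resetPoint]
  have e4 : spin (spin (spin (spin p))) =
      resetPoint ((((p.map (fun q => (q.2, -q.1))).map (fun q => (q.2, -q.1))).map
        (fun q => (q.2, -q.1))).map (fun q => (q.2, -q.1))) := by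
    rw [e3, spin_resetPoint]
  rw [e4]
  have hid : ((((p.map (fun q => (q.2, -q.1))).map (fun q => (q.2, -q.1))).map
      (fun q => (q.2, -q.1))).map (fun q => (q.2, -q.1))) = p := by
    simp only [List.map_map]
    have hfun : ((fun q : Int × Int => (q.2, -q.1)) ∘ (fun q : Int × Int => (q.2, -q.1)) ∘
        (fun q : Int × Int => (q.2, -q.1)) ∘ (fun q : Int × Int => (q.2, -q.1))) = id := by
      funext q; simp
    rw [hfun, List.map_id]
  rw [hid]
  exact hp

-- ▸ orbit machinery
theorem orbit_shift {p : List (Int × Int)} (hp : IsNorm p) (y : List (Int × Int)) :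
    sOrbitMem y (spin p) ↔ sOrbitMem y p := by
  unfold sOrbitMem
  have h4 := spin4 hp
  constructor
  · rintro (rfl | rfl | rfl | h)
    · exact Or.inr (Or.inl rfl)
    · exact Or.inr (Or.inr (Or.inl rfl))
    · exact Or.inr (Or.inr (Or.inr rfl))
    · rw [h4] at h; exact Or.inl h
  · rintro (rfl | rfl | rfl | rfl)
    · exact Or.inr (Or.inr (Or.inr h4.symm))
    · exact Or.inl rfl
    · exact Or.inr (Or.inl rfl)
    · exact Or.inr (Or.inr (Or.inl rfl))

theorem orbit_symm {p q : List (Int × Int)} (hp : IsNorm p) (h : sOrbitMem q p) :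
    sOrbitMem p q := by
  have h4 := spin4 hp
  rcases h with rfl | rfl | rfl | rfl
  · exact Or.inl rfl
  · exact Or.inr (Or.inr (Or.inr h4.symm))
  · exact Or.inr (Or.inr (Or.inl h4.symm))
  · exact Or.inr (Or.inl h4.symm)

theorem orbit_trans {a b c : List (Int × Int)} (hc : IsNorm c) (hab : sOrbitMem a b)
    (hbc : sOrbitMem b c) : sOrbitMem a c := by
  rcases hbc with rfl | rfl | rfl | rfl
  · exact hab
  · exact (orbit_shift hc a).mp hab
  · exact (orbit_shift hc a).mp ((orbit_shift (isNorm_spin c) a).mp hab)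
  · exact (orbit_shift hc a).mp ((orbit_shift (isNorm_spin c) a).mp
      ((orbit_shift (isNorm_spin (spin c)) a).mp hab))

theorem canonical_eq_min2 (s : List (Int × Int)) :
    canonical s = min2 (min2 (min2 s (spin s)) (spin (spin s))) (spin (spin (spin s))) := rfl

theorem min2_mem (x y : List (Int × Int)) : min2 x y = x ∨ min2 x y = y := by
  unfold min2; split_ifs <;> simp

theorem min2_left (x y : List (Int × Int)) : shapeLt x (min2 x y) = false := by
  unfold min2
  split_ifs with h
  · exact shapeLt_asymm h
  · exact shapeLt_irrefl x

theorem min2_right (x y : List (Int × Int)) : shapeLt y (min2 x y) = false := by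
  unfold min2
  split_ifs with h
  · exact shapeLt_irrefl y
  · simpa using h

theorem canonical_mem (s : List (Int × Int)) : sOrbitMem (canonical s) s := by
  rw [canonical_eq_min2]
  unfold sOrbitMem
  rcases min2_mem (min2 (min2 s (spin s)) (spin (spin s))) (spin (spin (spin s))) with h | h <;>
    rw [h]
  · rcases min2_mem (min2 s (spin s)) (spin (spin s)) with h2 | h2 <;> rw [h2]
    · rcases min2_mem s (spin s) with h3 | h3 <;> rw [h3] <;> tauto
    · tauto
  · tauto

theorem canonical_min (s : List (Int × Int)) :
    ∀ y, sOrbitMem y s → shapeLt y (canonical s) = false := by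
  intro y hy
  rw [canonical_eq_min2]
  have hs : shapeLt s (min2 s (spin s)) = false := min2_left _ _
  have hs1 : shapeLt (spin s) (min2 s (spin s)) = false := min2_right _ _
  have h12 : shapeLt (min2 s (spin s)) (min2 (min2 s (spin s)) (spin (spin s))) = false :=
    min2_left _ _
  have hs2 : shapeLt (spin (spin s)) (min2 (min2 s (spin s)) (spin (spin s))) = false :=
    min2_right _ _
  have h23 : shapeLt (min2 (min2 s (spin s)) (spin (spin s)))
      (min2 (min2 (min2 s (spin s)) (spin (spin s))) (spin (spin (spin s)))) = false :=
    min2_left _ _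
  have hs3 : shapeLt (spin (spin (spin s)))
      (min2 (min2 (min2 s (spin s)) (spin (spin s))) (spin (spin (spin s)))) = false :=
    min2_right _ _
  rcases hy with rfl | rfl | rfl | rfl
  · exact shapeLt_negtrans (shapeLt_negtrans hs h12) h23
  · exact shapeLt_negtrans (shapeLt_negtrans hs1 h12) h23
  · exact shapeLt_negtrans hs2 h23
  · exact hs3

theorem canonical_eq_of_orbit {p q : List (Int × Int)} (hp : IsNorm p) (hq : sOrbitMem q p) :
    canonical q = canonical p := by
  have horb : ∀ y, sOrbitMem y q ↔ sOrbitMem y p := by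
    rcases hq with rfl | rfl | rfl | rfl
    · exact fun y => Iff.rfl
    · exact orbit_shift hp
    · exact fun y => (orbit_shift (isNorm_spin p) y).trans (orbit_shift hp y)
    · exact fun y => (orbit_shift (isNorm_spin (spin p)) y).trans
        ((orbit_shift (isNorm_spin p) y).trans (orbit_shift hp y))
  have h1 : sOrbitMem (canonical q) p := (horb _).mp (canonical_mem q)
  have h2 : sOrbitMem (canonical p) q := (horb _).mpr (canonical_mem p)
  exact shapeLt_conn (canonical_min p _ h1) (canonical_min q _ h2)

theorem orbit_of_canonical_eq {p q : List (Int × Int)} (hp : IsNorm p) (hq : IsNorm q)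
    (h : canonical p = canonical q) : sOrbitMem q p := by
  have h1 : sOrbitMem (canonical q) q := canonical_mem q
  have h2 : sOrbitMem q (canonical q) := orbit_symm hq h1
  have h3 : sOrbitMem (canonical p) p := canonical_mem p
  rw [h] at h3
  exact orbit_trans hp h2 h3

theorem tryRot_iff (b q : List (Int × Int)) : tryRot 4 b q = true ↔ sOrbitMem q b := by
  have hunf : tryRot 4 b q = (if b = q then true else if spin b = q then true else
      if spin (spin b) = q then true else if spin (spin (spin b)) = q then true else false) := rfl
  rw [hunf]
  unfold sOrbitMem
  constructor
  · intro h
    split_ifs at h with h1 h2 h3 h4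
    · exact Or.inl h1.symm
    · exact Or.inr (Or.inl h2.symm)
    · exact Or.inr (Or.inr (Or.inl h3.symm))
    · exact Or.inr (Or.inr (Or.inr h4.symm))
  · intro h
    have ht : (b = q ∨ spin b = q ∨ spin (spin b) = q ∨ spin (spin (spin b)) = q) →
        (if b = q then true else if spin b = q then true else if spin (spin b) = q then true
          else if spin (spin (spin b)) = q then true else false) = true := by
      intro hh
      split_ifs <;> tauto
    apply ht
    rcases h with rfl | rfl | rfl | rfl
    · exact Or.inl rfl
    · exact Or.inr (Or.inl rfl)
    · exact Or.inr (Or.inr (Or.inl rfl))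
    · exact Or.inr (Or.inr (Or.inr rfl))

-- ▸ same_or_not characterisation
theorem snGo_all_false (blank : List (Int × Int)) (full : List (List (Int × Int))) :
    ∀ rest, (∀ b ∈ rest, tryRot 4 b blank = false) → snGo blank full rest = (0, full) := by
  intro rest h
  induction rest with
  | nil => rfl
  | cons c cs ih =>
    have hc : tryRot 4 c blank = false := h c List.mem_cons_self
    simp only [snGo, hc, Bool.false_eq_true, if_false]
    exact ih (fun b hb => h b (List.mem_cons_of_mem _ hb))

theorem snGo_first (blank : List (Int × Int)) (full : List (List (Int × Int))) :
    ∀ pre b suf, (∀ c ∈ pre, tryRot 4 c blank = false) → tryRot 4 b blank = true →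
      snGo blank full (pre ++ b :: suf) =
        ((blank.length : Int), (PySem.List.remove? full b).getD full) := by
  intro pre
  induction pre with
  | nil =>
    intro b suf _ hb
    simp only [List.nil_append, snGo, hb, if_true]
  | cons c cs ih =>
    intro b suf hpre hb
    have hc : tryRot 4 c blank = false := hpre c List.mem_cons_self
    simp only [List.cons_append, snGo, hc, Bool.false_eq_true, if_false]
    exact ih b suf (fun d hd => hpre d (List.mem_cons_of_mem _ hd)) hb

-- ▸ the counter invariant
theorem counterOf_inv (blocks : List (List (Int × Int))) : CntInv blocks (counterOf blocks) := by
  intro k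
  unfold counterOf
  have h := PySem.Dict.getD_foldl_modify_add_one (blocks.map canonical) PySem.Dict.empty k
  rw [List.foldl_map] at h
  rw [h]
  simp

theorem count_map_erase (blocks : List (List (Int × Int))) (b : List (Int × Int))
    (hb : b ∈ blocks) (k : List (Int × Int)) :
    (blocks.map canonical).count k =
      ((blocks.erase b).map canonical).count k + (if canonical b = k then 1 else 0) := by
  obtain ⟨l₁, l₂, hnot, heq, herase⟩ := List.exists_erase_eq hb
  rw [herase, heq]
  simp only [List.map_append, List.map_cons, List.count_append, List.count_cons]
  by_cases h : canonical b = k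
  · simp [h]
    omega
  · simp [h]

-- ▸ the per-blank step
theorem step_lemma (blank : List (Int × Int)) (blocks : List (List (Int × Int)))
    (counts : PySem.Dict (List (Int × Int)) Int)
    (hb : IsNorm blank) (hN : ∀ b ∈ blocks, IsNorm b) (hInv : CntInv blocks counts) :
    (if 0 < counts.getD (canonical blank) 0 then
      (sameOrNot blank blocks).1 = (blank.length : Int) ∧
        CntInv (sameOrNot blank blocks).2 (counts.modify (canonical blank) 0 (· - 1)) ∧
        (∀ b ∈ (sameOrNot blank blocks).2, IsNorm b)
    else (sameOrNot blank blocks).1 = 0 ∧ (sameOrNot blank blocks).2 = blocks) := by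
  have hmatch : (∃ b ∈ blocks, tryRot 4 b blank = true) ↔
      0 < counts.getD (canonical blank) 0 := by
    rw [hInv (canonical blank)]
    constructor
    · rintro ⟨b, hbm, hrot⟩
      have horbit : sOrbitMem blank b := (tryRot_iff b blank).mp hrot
      have hcan : canonical blank = canonical b := canonical_eq_of_orbit (hN b hbm) horbit
      have hmem : canonical blank ∈ blocks.map canonical :=
        hcan ▸ List.mem_map_of_mem hbm
      exact_mod_cast List.count_pos_iff.mpr hmem
    · intro hpos
      have hmem : canonical blank ∈ blocks.map canonical :=
        List.count_pos_iff.mp (by exact_mod_cast hpos)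
      obtain ⟨b, hbm, hcan⟩ := List.mem_map.mp hmem
      refine ⟨b, hbm, (tryRot_iff b blank).mpr ?_⟩
      exact orbit_of_canonical_eq (hN b hbm) hb hcan
  split_ifs with hpos
  · obtain ⟨b0, hb0m, hb0⟩ := hmatch.mpr hpos
    have hsome : (List.find? (fun b => tryRot 4 b blank) blocks).isSome := by
      rw [List.find?_isSome]
      exact ⟨b0, hb0m, hb0⟩
    obtain ⟨b, hfb⟩ := Option.isSome_iff_exists.mp hsome
    rw [List.find?_eq_some_iff_append] at hfb
    obtain ⟨hpb, pre, suf, heq, hpre⟩ := hfb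
    have hbmem : b ∈ blocks := heq ▸ List.mem_append_right _ List.mem_cons_self
    have hsn : sameOrNot blank blocks =
        ((blank.length : Int), (PySem.List.remove? blocks b).getD blocks) := by
      unfold sameOrNot
      have hfirst := snGo_first blank blocks pre b suf
        (fun c hc => by simpa using hpre c hc) hpb
      rw [← heq] at hfirst
      exact hfirst
    have hrm : PySem.List.remove? blocks b = some (blocks.erase b) :=
      PySem.List.remove?_eq_some_erase blocks b hbmem
    have hcanb : canonical blank = canonical b :=
      canonical_eq_of_orbit (hN b hbmem) ((tryRot_iff b blank).mp hpb)
    have hs1 : (sameOrNot blank blocks).1 = (blank.length : Int) := by simp [hsn]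
    have hs2 : (sameOrNot blank blocks).2 = blocks.erase b := by simp [hsn, hrm]
    rw [hs1, hs2]
    refine ⟨rfl, ?_, ?_⟩
    · intro k
      by_cases hk : k = canonical blank
      · subst hk
        rw [PySem.Dict.getD_modify_self, hInv,
          count_map_erase blocks b hbmem (canonical blank), if_pos hcanb.symm]
        push_cast
        ring
      · rw [PySem.Dict.getD_modify_of_ne _ _ _ hk, hInv,
          count_map_erase blocks b hbmem k]
        rw [if_neg (by rw [← hcanb]; exact fun h => hk h.symm)]
        simp
    · intro x hx
      exact hN x (List.mem_of_mem_erase hx)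
  · have hnone : ∀ b ∈ blocks, tryRot 4 b blank = false := by
      intro b hbm
      by_contra hcon
      rw [Bool.not_eq_false] at hcon
      exact hpos (hmatch.mp ⟨b, hbm, hcon⟩)
    unfold sameOrNot
    rw [snGo_all_false blank blocks blocks hnone]
    exact ⟨rfl, rfl⟩

-- ▸ all collected blocks are resetPoint images
theorem collectJ_norm (i : Int) (js : List Int) (st : List (List Int) × List (List (Int × Int)))
    (h : ∀ b ∈ st.2, IsNorm b) : ∀ b ∈ (collectJ i js st).2, IsNorm b := by
  induction js generalizing st with
  | nil => exact h
  | cons j js ih =>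
    obtain ⟨m, blocks⟩ := st
    simp only [collectJ]
    split_ifs with hm
    · apply ih
      intro b hbm
      rcases List.mem_append.mp hbm with h1 | h1
      · exact h b h1
      · rw [List.mem_singleton.mp h1]; exact isNorm_resetPoint _
    · exact ih _ h

theorem collectI_norm (is : List Int) (st : List (List Int) × List (List (Int × Int)))
    (h : ∀ b ∈ st.2, IsNorm b) : ∀ b ∈ (collectI is st).2, IsNorm b := by
  induction is generalizing st with
  | nil => exact h
  | cons i is ih =>
    obtain ⟨m, blocks⟩ := st
    simp only [collectI]
    exact ih _ (collectJ_norm i _ _ h)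

-- ▸ the parallel answer loops
theorem ansJ_congr (i : Int) (js : List Int) (m : List (List Int))
    (blocks : List (List (Int × Int))) (counts : PySem.Dict (List (Int × Int)) Int) (ans : Int)
    (hN : ∀ b ∈ blocks, IsNorm b) (hInv : CntInv blocks counts) :
    (ansJ i js (m, blocks, ans)).1 = (ansJB i js (m, counts, ans)).1 ∧
    (ansJ i js (m, blocks, ans)).2.2 = (ansJB i js (m, counts, ans)).2.2 ∧
    (∀ b ∈ (ansJ i js (m, blocks, ans)).2.1, IsNorm b) ∧
    CntInv (ansJ i js (m, blocks, ans)).2.1 (ansJB i js (m, counts, ans)).2.1 := by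
  induction js generalizing m blocks counts ans with
  | nil => exact ⟨rfl, rfl, hN, hInv⟩
  | cons j js ih =>
    simp only [ansJ, ansJB]
    split_ifs with hm hpos
    · have hstep := step_lemma (resetPoint (findOut i j m false).1) blocks counts
        (isNorm_resetPoint _) hN hInv
      rw [if_pos hpos] at hstep
      obtain ⟨hlen, hinv2, hnorm2⟩ := hstep
      rw [hlen]
      exact ih _ _ _ _ hnorm2 hinv2
    · have hstep := step_lemma (resetPoint (findOut i j m false).1) blocks counts
        (isNorm_resetPoint _) hN hInv
      rw [if_neg hpos] at hstep
      obtain ⟨hzero, hsame⟩ := hstep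
      rw [hzero, hsame, add_zero]
      exact ih _ _ _ _ hN hInv
    · exact ih _ _ _ _ hN hInv

theorem ansI_congr (is : List Int) (m : List (List Int))
    (blocks : List (List (Int × Int))) (counts : PySem.Dict (List (Int × Int)) Int) (ans : Int)
    (hN : ∀ b ∈ blocks, IsNorm b) (hInv : CntInv blocks counts) :
    (ansI is (m, blocks, ans)).2.2 = (ansIB is (m, counts, ans)).2.2 := by
  induction is generalizing m blocks counts ans with
  | nil => rfl
  | cons i is ih =>
    simp only [ansI, ansIB]
    obtain ⟨h1, h2, h3, h4⟩ := ansJ_congr i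
      (PySem.List.pyRange 0 (((m.headD []).length : Nat) : Int) 1) m blocks counts ans hN hInv
    have hra : ansJ i (PySem.List.pyRange 0 (((m.headD []).length : Nat) : Int) 1) (m, blocks, ans) =
        ((ansJ i (PySem.List.pyRange 0 (((m.headD []).length : Nat) : Int) 1) (m, blocks, ans)).1,
         (ansJ i (PySem.List.pyRange 0 (((m.headD []).length : Nat) : Int) 1) (m, blocks, ans)).2.1,
         (ansJ i (PySem.List.pyRange 0 (((m.headD []).length : Nat) : Int) 1) (m, blocks, ans)).2.2) := rfl
    have hrb : ansJB i (PySem.List.pyRange 0 (((m.headD []).length : Nat) : Int) 1) (m, counts, ans) =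
        ((ansJ i (PySem.List.pyRange 0 (((m.headD []).length : Nat) : Int) 1) (m, blocks, ans)).1,
         (ansJB i (PySem.List.pyRange 0 (((m.headD []).length : Nat) : Int) 1) (m, counts, ans)).2.1,
         (ansJ i (PySem.List.pyRange 0 (((m.headD []).length : Nat) : Int) 1) (m, blocks, ans)).2.2) := by
      rw [h1, h2]
    rw [hra, hrb]
    exact ih _ _ _ _ h3 h4

-- ===== VERDICT (by name: the statement is the Claim_ definition above) =====
theorem solution_spec : Claim_equal_solution := by
  intro gb tb _ _
  show solution gb tb = solution_alt gb tb
  unfold solution solution_alt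
  exact ansI_congr _ _ _ _ _ (collectI_norm _ _ (by simp)) (counterOf_inv _)
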